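-- pv_equiv track=rewrite | github.com/google-research/language | language/labs/drkit/metaqa/preprocessing/metaqa_preprocess.py | get_intermediate_entities
-- ===== SOURCE A (Python) =====
-- def get_intermediate_entities(kb, topic_ent, chain):
--   """Get all tail entities of a topic entity following a chain of relations.
--
--   Args:
--     kb: dictionary to store the KB {subject: {relation: objects}}
--     topic_ent: topic entity to start with
--     chain: a list of relations to follow
--
--   Returns:
--     a set of tail entities
--   """
--   cur_ents = set([topic_ent])
--   intermediate_entities = [cur_ents]
--   for rel in chain:
--     next_ents = set()
--     for ent in cur_ents:
--       if ent in kb and rel in kb[ent]: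
--         objs = kb[ent][rel]
--         next_ents.update(objs)
--     next_ents.discard(topic_ent)
--     cur_ents = next_ents
--     intermediate_entities.append(cur_ents)
--
--   return intermediate_entities
-- ===== SOURCE B (Python) =====
-- def get_intermediate_entities(kb, topic_ent, chain):
--   """Get all tail entities of a topic entity following a chain of relations."""
--   cache = {}
--   def reach(k):
--     # entities reachable from topic_ent after following chain[:k]
--     if k in cache:
--       return cache[k]
--     if k == 0:
--       res = {topic_ent}
--     else:
--       rel = chain[k - 1]
--       objs = []
--       for ent in reach(k - 1):
--         if ent in kb and rel in kb[ent]: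
--           objs.extend(kb[ent][rel])
--       res = set(objs) - {topic_ent}
--     cache[k] = res
--     return res
--   return [reach(k) for k in range(len(chain) + 1)]
-- ===== Notes on version B (the rewrite author's own statement) =====
-- stated objective: alternative
-- what changed: Replaces A's single forward loop with mutable set state and an accumulator list by a memoized recursive function reach(k) defined on chain prefixes (collecting objects into a flat list, deduplicating once with set() minus {topic_ent}), the result being a comprehension [reach(k) for k in range(len(chain)+1)]: top-down recursion with a cache instead of A's bottom-up imperative pass.
import Mathlib
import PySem

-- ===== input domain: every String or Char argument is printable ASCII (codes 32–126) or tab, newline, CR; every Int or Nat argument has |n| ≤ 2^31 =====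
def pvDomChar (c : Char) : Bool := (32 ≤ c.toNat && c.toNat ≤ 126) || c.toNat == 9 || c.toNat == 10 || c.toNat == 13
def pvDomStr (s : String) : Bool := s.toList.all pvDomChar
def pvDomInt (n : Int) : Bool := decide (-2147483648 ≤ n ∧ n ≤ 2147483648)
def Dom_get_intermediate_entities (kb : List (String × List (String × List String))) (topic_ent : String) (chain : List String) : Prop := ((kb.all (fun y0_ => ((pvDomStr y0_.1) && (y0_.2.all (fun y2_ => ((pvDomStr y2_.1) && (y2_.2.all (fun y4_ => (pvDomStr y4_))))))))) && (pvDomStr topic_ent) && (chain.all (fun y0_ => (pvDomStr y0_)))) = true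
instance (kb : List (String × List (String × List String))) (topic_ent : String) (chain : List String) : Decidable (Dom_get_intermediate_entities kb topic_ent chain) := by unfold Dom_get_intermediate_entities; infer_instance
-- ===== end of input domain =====

-- B computes the frontier of each chain prefix with a memoized recursive helper reach(k) and a
-- comprehension over prefix lengths; A makes one incremental pass with mutable set state.
-- Return values proved equal (same lists).

-- ===== PORT A =====
-- first-match association-list lookup (Python dict lookup under the type convention)
def pyLookup {A : Type} (d : List (String × A)) (k : String) : Option A :=
  (d.find? (fun p => p.1 == k)).map (·.2)

-- inner loop of A: 'for ent in cur_ents: if ent in kb and rel in kb[ent]: next_ents.update(objs)'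
def aInner (kb : List (String × List (String × List String))) (rel : String)
    (cur : PySem.Set String) : PySem.Set String :=
  cur.foldl (fun next_ents ent =>
    match pyLookup kb ent with
    | some rels =>
      match pyLookup rels rel with
      | some objs => PySem.Set.update next_ents objs
      | none => next_ents
    | none => next_ents) PySem.Set.empty

def get_intermediate_entities (kb : List (String × List (String × List String))) (topic_ent : String) (chain : List String) : List (List String) :=
  let cur_ents : PySem.Set String := PySem.Set.ofList [topic_ent]
  (chain.foldl (fun (st : PySem.Set String × List (List String)) rel =>
      let next_ents := PySem.Set.discard (aInner kb rel st.1) topic_ent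
      (next_ents, st.2 ++ [next_ents]))
    (cur_ents, [cur_ents])).2

-- ===== PORT B =====
-- B's recursive helper reach(k): the frontier after following chain[:k]. Its memo cache only
-- shares already-computed values, so the port is the plain structural recursion on k.
-- 'rel = chain[k - 1]' is ported as chain.getD k "" in the k+1 case (always in range when
-- reached from the comprehension below, k+1 ≤ len(chain)).
def bReach (kb : List (String × List (String × List String))) (topic_ent : String)
    (chain : List String) : Nat → PySem.Set String
  | 0 => PySem.Set.ofList [topic_ent]
  | k+1 =>
    let rel := chain.getD k ""
    let objs := (bReach kb topic_ent chain k).foldl (fun objs ent =>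
      match pyLookup kb ent with
      | some rels =>
        match pyLookup rels rel with
        | some os => objs ++ os
        | none => objs
      | none => objs) []
    PySem.Set.diff (PySem.Set.ofList objs) (PySem.Set.ofList [topic_ent])

-- '[reach(k) for k in range(len(chain) + 1)]'
def get_intermediate_entities_alt (kb : List (String × List (String × List String))) (topic_ent : String) (chain : List String) : List (List String) :=
  (List.range (chain.length + 1)).map (bReach kb topic_ent chain)

-- ===== PRECONDITION & SPEC =====
def Spec_get_intermediate_entities (kb : List (String × List (String × List String))) (topic_ent : String) (chain : List String) (out : List (List String)) : Prop := out = get_intermediate_entities_alt kb topic_ent chain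
instance (kb : List (String × List (String × List String))) (topic_ent : String) (chain : List String) (out : List (List String)) : Decidable (Spec_get_intermediate_entities kb topic_ent chain out) := by unfold Spec_get_intermediate_entities; infer_instance

-- ===== CLAIM (what is proved, stated in full; the proofs are below) =====
def Claim_equal_get_intermediate_entities : Prop := ∀ (kb : List (String × List (String × List String))) (topic_ent : String) (chain : List String), Dom_get_intermediate_entities kb topic_ent chain → Spec_get_intermediate_entities kb topic_ent chain (get_intermediate_entities kb topic_ent chain)

-- ===== LEMMAS AND PROOFS =====

-- removing one element: set difference with a singleton is discard
theorem diff_singleton (s : PySem.Set String) (x : String) :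
    PySem.Set.diff s (PySem.Set.ofList [x]) = PySem.Set.discard s x := by
  simp only [PySem.Set.diff, PySem.Set.ofList, PySem.Set.empty_eq, List.foldl_cons,
    List.not_mem_nil, not_false_eq_true, PySem.Set.add_of_not_mem, List.nil_append,
    List.foldl_nil, PySem.Set.contains_eq_listContains, List.contains_eq_mem, List.mem_cons,
    or_false, PySem.Set.discard]
  exact List.filter_congr (fun y _ => by simp only [Bool.not_inj_iff]; exact (Bool.beq_eq_decide_eq y x).symm)

-- A's inner loop accumulates exactly the union over the flattened object lists
theorem aInner_eq (kb : List (String × List (String × List String))) (rel : String)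
    (cur : PySem.Set String) (s : PySem.Set String) :
    cur.foldl (fun next_ents ent =>
      match pyLookup kb ent with
      | some rels =>
        match pyLookup rels rel with
        | some objs => PySem.Set.update next_ents objs
        | none => next_ents
      | none => next_ents) s
    = PySem.Set.update s (cur.flatMap (fun ent =>
        (pyLookup ((pyLookup kb ent).getD []) rel).getD [])) := by
  induction cur generalizing s with
  | nil => simp [PySem.Set.update_nil]
  | cons e rest ih =>
    simp only [List.foldl_cons, List.flatMap_cons, ih, PySem.Set.update_append]
    congr 1
    cases h1 : pyLookup kb e with
    | none => simp [pyLookup, PySem.Set.update_nil]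
    | some rels =>
      cases h2 : pyLookup rels rel with
      | none => simp [h2, PySem.Set.update_nil]
      | some objs => simp [h2]

-- B's object-collecting loop builds exactly the flattened object lists
theorem bObjs_eq (kb : List (String × List (String × List String))) (rel : String)
    (cur : PySem.Set String) (l : List String) :
    cur.foldl (fun objs ent =>
      match pyLookup kb ent with
      | some rels =>
        match pyLookup rels rel with
        | some os => objs ++ os
        | none => objs
      | none => objs) l
    = l ++ cur.flatMap (fun ent =>
        (pyLookup ((pyLookup kb ent).getD []) rel).getD []) := by
  induction cur generalizing l with
  | nil => simp
  | cons e rest ih =>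
    simp only [List.foldl_cons, List.flatMap_cons, ih]
    rw [← List.append_assoc]
    congr 1
    cases h1 : pyLookup kb e with
    | none => simp [pyLookup]
    | some rels =>
      cases h2 : pyLookup rels rel with
      | none => simp [h2]
      | some objs => simp [h2]

-- one step of A, applied to reach(k), yields reach(k+1) (rel being chain[k])
theorem step_eq (kb : List (String × List (String × List String))) (topic_ent : String)
    (chain : List String) (k : Nat) (rel : String) (hrel : chain.getD k "" = rel) :
    PySem.Set.discard (aInner kb rel (bReach kb topic_ent chain k)) topic_ent
    = bReach kb topic_ent chain (k+1) := by
  rw [bReach, hrel, bObjs_eq, List.nil_append, ← diff_singleton]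
  congr 1
  rw [aInner, aInner_eq, PySem.Set.update_empty]

-- A's fold over the remaining relations produces B's frontiers for the remaining prefix lengths
theorem foldA_eq (kb : List (String × List (String × List String))) (topic_ent : String)
    (chain : List String) (rest : List String) (j : Nat) (hdrop : chain.drop j = rest)
    (acc : List (List String)) :
    (rest.foldl (fun (st : PySem.Set String × List (List String)) rel =>
        let next_ents := PySem.Set.discard (aInner kb rel st.1) topic_ent
        (next_ents, st.2 ++ [next_ents])) (bReach kb topic_ent chain j, acc)).2
    = acc ++ (List.range' (j+1) rest.length).map (bReach kb topic_ent chain) := by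
  induction rest generalizing j acc with
  | nil => simp
  | cons rel rest ih =>
    have hget : chain.getD j "" = rel := by
      have : chain[j]? = some rel := by
        rw [← List.head?_drop, hdrop]; rfl
      simp [List.getD, this]
    have hdrop' : chain.drop (j+1) = rest := by
      have := congrArg List.tail hdrop
      simpa [List.tail_drop] using this
    simp only [List.foldl_cons, step_eq kb topic_ent chain j rel hget]
    rw [ih (j+1) hdrop']
    simp [List.range'_succ]

-- ===== VERDICT (by name: the statement is the Claim_ definition above) =====
theorem get_intermediate_entities_spec : Claim_equal_get_intermediate_entities := by
  intro kb topic_ent chain _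
  unfold Spec_get_intermediate_entities get_intermediate_entities get_intermediate_entities_alt
  have h0 : (PySem.Set.ofList [topic_ent] : PySem.Set String) = bReach kb topic_ent chain 0 := rfl
  rw [h0, foldA_eq kb topic_ent chain chain 0 (by simp) [bReach kb topic_ent chain 0]]
  simp [List.range_eq_range', List.range'_succ]
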